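-- pv_equiv track=rewrite | github.com/Dahyunne/Algorithm | programmers/insufficient_money.py | solution
-- ===== SOURCE A (Python) =====
-- def solution(price, money, count):
--     sum = 0
--     for i in range(count+1):
--         sum = sum + (price * i)
--     if (money - sum) < 0:
--         answer = abs(money - sum)
--     else:
--         answer = 0
--     return answer
-- ===== SOURCE B (Python) =====
-- def solution(price, money, count):
--     n = max(count, 0)
--     total = price * n * (n + 1) // 2
--     return max(0, total - money)
-- ===== Notes on version B (the rewrite author's own statement) =====
-- stated objective: faster
-- what changed: Replaces the O(count) summation loop with the closed-form arithmetic-series formula price*n*(n+1)//2 and a max for the shortfall.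
import Mathlib
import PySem

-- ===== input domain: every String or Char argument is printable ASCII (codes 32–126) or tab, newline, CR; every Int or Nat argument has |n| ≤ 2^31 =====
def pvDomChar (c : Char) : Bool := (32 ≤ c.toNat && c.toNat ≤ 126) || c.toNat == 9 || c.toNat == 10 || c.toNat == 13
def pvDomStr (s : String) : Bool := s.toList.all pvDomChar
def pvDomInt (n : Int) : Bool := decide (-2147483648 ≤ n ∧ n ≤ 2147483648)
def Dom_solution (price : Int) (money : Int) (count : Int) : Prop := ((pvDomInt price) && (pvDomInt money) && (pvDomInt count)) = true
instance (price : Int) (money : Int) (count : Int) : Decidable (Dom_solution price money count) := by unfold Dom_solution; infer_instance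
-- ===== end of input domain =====

-- B replaces A's O(count) summation loop with the closed-form series sum price*n*(n+1)//2 (objective: faster).
-- ===== PORT A =====
def solution (price : Int) (money : Int) (count : Int) : Int :=
  let sum := (PySem.List.pyRange 0 (count + 1) 1).foldl (fun s i => s + price * i) 0
  if money - sum < 0 then |money - sum| else 0

-- ===== PORT B =====
def solution_alt (price : Int) (money : Int) (count : Int) : Int :=
  let n := max count 0
  let total := PySem.Int.floordiv (price * n * (n + 1)) 2
  max 0 (total - money)

-- ===== PRECONDITION & SPEC =====
def Spec_solution (price : Int) (money : Int) (count : Int) (out : Int) : Prop := out = solution_alt price money count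
instance (price : Int) (money : Int) (count : Int) (out : Int) : Decidable (Spec_solution price money count out) := by unfold Spec_solution; infer_instance

-- ===== CLAIM (what is proved, stated in full; the proofs are below) =====
def Claim_equal_solution : Prop := ∀ (price : Int) (money : Int) (count : Int), Dom_solution price money count → Spec_solution price money count (solution price money count)

-- ===== LEMMAS AND PROOFS =====

-- ===== VERDICT (by name: the statement is the Claim_ definition above) =====
-- closed form of A's summation loop: twice the folded sum is price * m * (m-1)
lemma pv_sum_loop (price : Int) (m : Nat) :
    ((List.range m).map (fun k : Nat => (0 : Int) + k)).foldl (fun s i => s + price * i) 0 * 2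
      = price * m * (m - 1) := by
  induction m with
  | zero => simp
  | succ m ih =>
    rw [List.range_succ, List.map_append, List.foldl_append]
    simp only [List.map_cons, List.map_nil, List.foldl_cons, List.foldl_nil]
    push_cast
    push_cast at ih
    ring_nf
    ring_nf at ih
    linarith

theorem solution_spec : Claim_equal_solution := by
  intro price money count _
  unfold Spec_solution solution solution_alt
  simp only [PySem.List.pyRange_one]
  have hsum := pv_sum_loop price (count + 1 - 0).toNat
  set S := ((List.range (count + 1 - 0).toNat).map (fun k : Nat => (0 : Int) + k)).foldl
      (fun s i => s + price * i) 0 with hS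
  by_cases hc : 0 ≤ count
  · have hm : ((count + 1 - 0).toNat : Int) = count + 1 := by omega
    rw [hm] at hsum
    have htot : PySem.Int.floordiv (price * max count 0 * (max count 0 + 1)) 2
        = price * max count 0 * (max count 0 + 1) / 2 :=
      PySem.Int.floordiv_eq_ediv_of_pos (by omega)
    rw [max_eq_left hc] at htot ⊢
    have heven : price * count * (count + 1) = 2 * S := by linarith
    rw [htot, heven, Int.mul_ediv_cancel_left _ (by omega : (2:Int) ≠ 0)]
    rcases lt_or_ge (money - S) 0 with h | h
    · rw [if_pos h, abs_of_neg h, max_eq_right (by omega)]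
      ring
    · rw [if_neg (by omega), max_eq_left (by omega)]
  · have hm : (count + 1 - 0).toNat = 0 := by omega
    rw [hm] at hS
    simp only [List.range_zero, List.map_nil, List.foldl_nil] at hS
    rw [max_eq_right (by omega : count ≤ 0)]
    simp only [mul_zero, zero_add, mul_one]
    have h0 : PySem.Int.floordiv 0 2 = 0 := by
      rw [PySem.Int.floordiv_eq_ediv_of_pos (by omega : (0:Int) < 2)]; rfl
    rw [h0, hS]
    rcases lt_or_ge (money - 0) 0 with h | h
    · rw [if_pos h, abs_of_neg h, max_eq_right (by omega)]
      ring
    · rw [if_neg (by omega), max_eq_left (by omega)]
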